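-- pv_equiv track=rewrite | github.com/milkywaygod2/Algorithm_C-Python | PythonInspector/09동적계획법_4짜장짬뽕볶음밥.py | eating
-- ===== SOURCE A (Python) =====
-- def eating(data) :
--     days = len(data)
--     d = [[0]*3 for i in range(days+1)]
--     #음식3개 날짜수만큼 배열만들고, 선호도가 입력값으로 들어감
--
--     for i in range(1,days+1): #1☞ 모든날
--         for j in range(3): #2☞ 오늘먹은음식
--             for k in range(3): #어제먹은음식
--                 if j == k: continue
--                 #3☞ 어제까지의 d비교갱신by오늘선택: 오늘d[i-1][k] vs 어제d[i][j]
--                 d[i][j] = max(d[i][j],d[i-1][k])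
--             d[i][j] += data[i-1][j] #4☞ 오늘선호도추가, i가 1부터 시작했음으로 인덱스0으로 조정
--
--     return max(d[days][j] for j in range(3)) #5☞ 최대값(총만족도[마지막날][오늘음식])
-- ===== SOURCE B (Python) =====
-- def eating(data):
--     from functools import lru_cache
--     n = len(data)
--
--     @lru_cache(maxsize=None)
--     def best(i, j):
--         # best satisfaction of a run of consecutive days ending on day i with food j
--         if i == 0:
--             return 0
--         return data[i - 1][j] + max(0, max(best(i - 1, k) for k in range(3) if k != j))
--
--     return max(best(n, 0), best(n, 1), best(n, 2))
-- ===== Notes on version B (the rewrite author's own statement) =====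
-- stated objective: alternative
-- what changed: Replaces A's bottom-up triple-nested-loop DP table with a top-down lru_cache-memoized recursion best(i, j) over (day, today's food), taking the max of the three top calls.
import Mathlib
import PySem

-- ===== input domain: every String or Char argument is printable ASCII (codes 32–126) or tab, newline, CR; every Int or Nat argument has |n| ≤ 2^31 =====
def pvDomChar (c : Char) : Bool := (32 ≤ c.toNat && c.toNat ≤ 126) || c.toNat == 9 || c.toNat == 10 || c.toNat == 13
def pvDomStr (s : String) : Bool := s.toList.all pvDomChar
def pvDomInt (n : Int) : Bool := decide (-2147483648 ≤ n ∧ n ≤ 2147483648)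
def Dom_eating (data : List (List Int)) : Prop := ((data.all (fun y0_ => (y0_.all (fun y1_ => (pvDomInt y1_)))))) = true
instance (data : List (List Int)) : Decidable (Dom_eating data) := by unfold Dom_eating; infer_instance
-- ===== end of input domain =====

-- B replaces A's bottom-up triple-loop table with a top-down memoized recursion best(i, j); alternative decomposition, same cost.

-- ===== PORT A =====
-- one day's table update: new[j] = (fold over k ≠ j maxing from 0) + data row entry j
def pvStepA (prev : List Int) (row : List Int) : List Int :=
  (List.range 3).map (fun j =>
    ((List.range 3).foldl (fun acc k => if j = k then acc else max acc (prev.getD k 0)) 0)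
      + row.getD j 0)

def eating (data : List (List Int)) : Int :=
  let d := List.foldl pvStepA [0, 0, 0] data
  -- max(d[days][j] for j in range(3))
  max (max (d.getD 0 0) (d.getD 1 0)) (d.getD 2 0)

-- ===== PORT B =====
-- best(i, j) of Source B, recursing on the first i rows (the list reversed): row = data[i-1]
def pvBestB : List (List Int) → Nat → Int
  | [], _ => 0
  | row :: earlier, j =>
      row.getD j 0 +
        max (0 : Int) (((List.range 3).foldl (fun (acc : Option Int) k =>
            if k = j then acc
            else some (match acc with
                       | none => pvBestB earlier k
                       | some a => max a (pvBestB earlier k))) none).getD 0)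

def eating_alt (data : List (List Int)) : Int :=
  let r := data.reverse
  max (max (pvBestB r 0) (pvBestB r 1)) (pvBestB r 2)

-- ===== PRECONDITION & SPEC =====
-- Pre_ excludes exactly the inputs on which both Pythons raise IndexError: a row with fewer than 3 entries.
def Pre_eating (data : List (List Int)) : Prop := ∀ row ∈ data, 3 ≤ row.length
instance (data : List (List Int)) : Decidable (Pre_eating data) := by unfold Pre_eating; infer_instance
def pvWitness_eating : List (List Int) := [[1, 2, 3], [4, 5, 6]]

def Spec_eating (data : List (List Int)) (out : Int) : Prop := out = eating_alt data
instance (data : List (List Int)) (out : Int) : Decidable (Spec_eating data out) := by unfold Spec_eating; infer_instance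

-- ===== CLAIM (what is proved, stated in full; the proofs are below) =====
def Claim_equal_eating : Prop := ∀ (data : List (List Int)), Dom_eating data → Pre_eating data → Spec_eating data (eating data)

-- ===== LEMMAS AND PROOFS =====
lemma pvBestB_cons (row : List Int) (earlier : List (List Int)) (j : Nat) (hj : j < 3) :
    pvBestB (row :: earlier) j =
      row.getD j 0 +
        max 0 (if j = 0 then max (pvBestB earlier 1) (pvBestB earlier 2)
               else if j = 1 then max (pvBestB earlier 0) (pvBestB earlier 2)
               else max (pvBestB earlier 0) (pvBestB earlier 1)) := by
  interval_cases j <;>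
    simp [pvBestB, show List.range 3 = [0,1,2] from rfl, List.foldl]

lemma pvFold_eq (data : List (List Int)) :
    List.foldl pvStepA [0, 0, 0] data =
      [pvBestB data.reverse 0, pvBestB data.reverse 1, pvBestB data.reverse 2] := by
  induction data using List.reverseRecOn with
  | nil => simp [pvBestB]
  | append_singleton p r ih =>
      rw [List.foldl_append, ih]
      simp only [List.foldl, List.reverse_append, List.reverse_cons, List.reverse_nil,
        List.nil_append, List.singleton_append]
      rw [pvBestB_cons r p.reverse 0 (by norm_num),
          pvBestB_cons r p.reverse 1 (by norm_num),
          pvBestB_cons r p.reverse 2 (by norm_num)]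
      simp [pvStepA, show List.range 3 = [0,1,2] from rfl, List.foldl]
      refine ⟨?_, ?_, ?_⟩ <;> omega

-- ===== VERDICT (by name: the statement is the Claim_ definition above) =====
theorem eating_spec : Claim_equal_eating := by
  intro data _ _
  show eating data = eating_alt data
  simp [eating, eating_alt, pvFold_eq]
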